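-- pv_equiv track=rewrite | github.com/doanac/ci-scripts | apps/archive_packages.py | _apk_versions
-- ===== SOURCE A (Python) =====
-- from typing import List, NamedTuple
--
-- class Package(NamedTuple):
--     name: str
--     vers: str
--
-- def _apk_versions(lines: List[str]) -> List[Package]:
--     packages: List[Package] = []
--     p = v = None
--     for line in lines:
--         if not line:
--             if p and v:
--                 packages.append(Package(p, v))
--             # new package
--             p = v = None
--         elif line[:2] == "P:":
--             p = line[2:]
--         elif line[:2] == "V:":
--             v = line[2:]
--     if p and v:
--         packages.append(Package(p, v))
--     return packages
-- ===== SOURCE B (Python) =====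
-- from typing import List, NamedTuple, Optional
--
-- class Package(NamedTuple):
--     name: str
--     vers: str
--
-- def _last_tag(group: List[str], tag: str) -> Optional[str]:
--     for line in reversed(group):
--         if line.startswith(tag):
--             return line[2:]
--     return None
--
-- def _apk_versions(lines: List[str]) -> List[Package]:
--     groups: List[List[str]] = []
--     cur: List[str] = []
--     for line in lines:
--         if not line:
--             groups.append(cur)
--             cur = []
--         else:
--             cur.append(line)
--     groups.append(cur)
--     packages: List[Package] = []
--     for g in groups:
--         name = _last_tag(g, "P:")
--         vers = _last_tag(g, "V:")
--         if name and vers: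
--             packages.append(Package(name, vers))
--     return packages
-- ===== Notes on version B (the rewrite author's own statement) =====
-- stated objective: alternative
-- what changed: Replaced the running p/v state machine by a two-phase decomposition: first partition the lines into blocks at empty lines, then for each block take the suffix of its last 'P:' and last 'V:' line and emit a package when both are non-empty.
import Mathlib
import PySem

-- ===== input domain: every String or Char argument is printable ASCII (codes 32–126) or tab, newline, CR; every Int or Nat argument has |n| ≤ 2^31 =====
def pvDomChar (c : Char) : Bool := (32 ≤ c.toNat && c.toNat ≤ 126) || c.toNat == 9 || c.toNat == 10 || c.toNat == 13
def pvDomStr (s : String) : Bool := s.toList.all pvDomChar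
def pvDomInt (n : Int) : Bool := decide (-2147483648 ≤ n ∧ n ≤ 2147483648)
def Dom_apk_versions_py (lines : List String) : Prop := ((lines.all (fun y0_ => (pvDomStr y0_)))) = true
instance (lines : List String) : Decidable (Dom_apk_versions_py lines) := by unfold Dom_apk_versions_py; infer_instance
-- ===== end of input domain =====

-- B replaces A's running p/v state machine by a two-phase decomposition (split into blocks at
-- empty lines, then pick each block's last 'P:'/'V:' line); alternative structure, same cost.


-- ===== PORT A =====
-- `if p and v: packages.append(Package(p, v))` — truthiness of the two optional strings
def pvEmit (packages : List (String × String)) (p v : Option String) : List (String × String) :=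
  match p, v with
  | some a, some b => if a ≠ "" ∧ b ≠ "" then packages ++ [(a, b)] else packages
  | _, _ => packages

-- one iteration of A's loop over (packages, p, v)
def pvStepA (st : List (String × String) × Option String × Option String) (line : String) :
    List (String × String) × Option String × Option String :=
  if line = "" then (pvEmit st.1 st.2.1 st.2.2, none, none)
  else if PySem.Str.slice line none (some 2) = "P:" then
    (st.1, some (PySem.Str.slice line (some 2) none), st.2.2)
  else if PySem.Str.slice line none (some 2) = "V:" then
    (st.1, st.2.1, some (PySem.Str.slice line (some 2) none))
  else st

-- the final `if p and v` after the loop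
def pvFinishA (st : List (String × String) × Option String × Option String) : List (String × String) :=
  pvEmit st.1 st.2.1 st.2.2

def apk_versions_py (lines : List String) : List (String × String) :=
  pvFinishA (lines.foldl pvStepA ([], none, none))

-- ===== PORT B =====
-- _last_tag: first line of reversed(group) starting with tag, its [2:] suffix
def pvLastTag (g : List String) (tag : String) : Option String :=
  (g.reverse.find? (fun line => PySem.Str.startswith line tag)).map
    (fun line => PySem.Str.slice line (some 2) none)

-- the package(s) (0 or 1) contributed by one block
def pvPkgOf (g : List String) : List (String × String) :=
  match pvLastTag g "P:", pvLastTag g "V:" with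
  | some n, some v => if n ≠ "" ∧ v ≠ "" then [(n, v)] else []
  | _, _ => []

-- one iteration of B's grouping loop over (groups, cur)
def pvGroupStep (st : List (List String) × List String) (line : String) :
    List (List String) × List String :=
  if line = "" then (st.1 ++ [st.2], []) else (st.1, st.2 ++ [line])

-- the trailing `groups.append(cur)` after the grouping loop
def pvFinishG (st : List (List String) × List String) : List (List String) :=
  st.1 ++ [st.2]

def apk_versions_py_alt (lines : List String) : List (String × String) :=
  (pvFinishG (lines.foldl pvGroupStep ([], []))).flatMap pvPkgOf

-- ===== PRECONDITION & SPEC =====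
def Spec_apk_versions_py (lines : List String) (out : List (String × String)) : Prop := out = apk_versions_py_alt lines
instance (lines : List String) (out : List (String × String)) : Decidable (Spec_apk_versions_py lines out) := by unfold Spec_apk_versions_py; infer_instance

-- ===== CLAIM (what is proved, stated in full; the proofs are below) =====
def Claim_equal_apk_versions_py : Prop := ∀ (lines : List String), Dom_apk_versions_py lines → Spec_apk_versions_py lines (apk_versions_py lines)

-- ===== LEMMAS AND PROOFS =====

-- A's loop, written as structural recursion emitting packages in place
def pvRunA : List String → Option String → Option String → List (String × String)
  | [], p, v => pvEmit [] p v
  | l :: ls, p, v =>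
    if l = "" then pvEmit [] p v ++ pvRunA ls none none
    else if PySem.Str.slice l none (some 2) = "P:" then
      pvRunA ls (some (PySem.Str.slice l (some 2) none)) v
    else if PySem.Str.slice l none (some 2) = "V:" then
      pvRunA ls p (some (PySem.Str.slice l (some 2) none))
    else pvRunA ls p v

-- B's grouping, written as structural recursion (front group built on the way out)
def pvGroups : List String → List (List String)
  | [] => [[]]
  | l :: ls =>
    if l = "" then [] :: pvGroups ls
    else
      match pvGroups ls with
      | g :: gs => (l :: g) :: gs
      | [] => [[l]]

-- groups with the still-open first group seeded by p/v carried in from the state machine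
def pvFromGroups : List (List String) → Option String → Option String → List (String × String)
  | [], p, v => pvEmit [] p v
  | g :: gs, p, v =>
    pvEmit [] ((pvLastTag g "P:").or p) ((pvLastTag g "V:").or v) ++ gs.flatMap pvPkgOf

def pvConsHead (cur : List String) : List (List String) → List (List String)
  | [] => [cur]
  | g :: gs => (cur ++ g) :: gs

lemma pvEmit_eq (acc : List (String × String)) (p v : Option String) :
    pvEmit acc p v = acc ++ pvEmit [] p v := by
  cases p <;> cases v <;> simp only [pvEmit] <;> (try split) <;> simp

lemma pvGroups_ne_nil (ls : List String) : pvGroups ls ≠ [] := by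
  cases ls with
  | nil => simp [pvGroups]
  | cons l ls =>
    simp only [pvGroups]
    split
    · simp
    · cases h : pvGroups ls <;> simp

lemma pvFoldA (ls : List String) :
    ∀ (acc : List (String × String)) (p v : Option String),
      pvFinishA (ls.foldl pvStepA (acc, p, v)) = acc ++ pvRunA ls p v := by
  induction ls with
  | nil =>
    intro acc p v
    show pvFinishA (acc, p, v) = acc ++ pvRunA [] p v
    rw [show pvRunA [] p v = pvEmit [] p v from rfl]
    exact pvEmit_eq acc p v
  | cons l ls ih =>
    intro acc p v
    simp only [List.foldl_cons, pvRunA, pvStepA]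
    split
    · rw [ih, pvEmit_eq acc p v, List.append_assoc]
    · split
      · exact ih acc _ v
      · split
        · exact ih acc p _
        · exact ih acc p v

lemma pvFoldG (ls : List String) :
    ∀ (gs : List (List String)) (cur : List String),
      pvFinishG (ls.foldl pvGroupStep (gs, cur)) = gs ++ pvConsHead cur (pvGroups ls) := by
  induction ls with
  | nil => intro gs cur; simp [pvFinishG, pvGroups, pvConsHead]
  | cons l ls ih =>
    intro gs cur
    simp only [List.foldl_cons, pvGroupStep, pvGroups]
    split
    · rw [ih]
      cases h : pvGroups ls with
      | nil => exact absurd h (pvGroups_ne_nil ls)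
      | cons g t => simp [pvConsHead]
    · rw [ih]
      cases h : pvGroups ls with
      | nil => exact absurd h (pvGroups_ne_nil ls)
      | cons g t => simp [pvConsHead]

-- B's startswith test agrees with A's slice test for a two-character tag
lemma pvStartswith_iff (l : String) (c₁ c₂ : Char) :
    PySem.Str.startswith l (String.ofList [c₁, c₂]) = true ↔
      PySem.Str.slice l none (some 2) = String.ofList [c₁, c₂] := by
  rw [← String.toList_inj]
  have h : (PySem.Str.slice l none (some 2)).toList = l.toList.take 2 := by simp [pysem]
  rw [h, PySem.Str.startswith_eq, PySem.Chars.startswith_iff, List.prefix_iff_eq_take]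
  simp [eq_comm]

lemma pvLastTag_cons (l : String) (g : List String) (tag : String) :
    pvLastTag (l :: g) tag =
      (pvLastTag g tag).or
        (if PySem.Str.startswith l tag then some (PySem.Str.slice l (some 2) none) else none) := by
  unfold pvLastTag
  rw [List.reverse_cons, List.find?_append]
  cases h : PySem.Str.startswith l tag with
  | false =>
    rw [PySem.Str.startswith_eq] at h
    rw [List.find?_cons_of_neg (by simp [h]), List.find?_nil]
    cases h2 : List.find? (fun line => PySem.Str.startswith line tag) g.reverse <;>
      simp [Option.or]
  | true =>
    rw [PySem.Str.startswith_eq] at h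
    rw [List.find?_cons_of_pos (by simp [h])]
    cases h2 : List.find? (fun line => PySem.Str.startswith line tag) g.reverse <;>
      simp [Option.or]

lemma pvFromGroups_none (gl : List (List String)) (h : gl ≠ []) :
    pvFromGroups gl none none = gl.flatMap pvPkgOf := by
  cases gl with
  | nil => exact absurd rfl h
  | cons g gs =>
    have he : pvFromGroups (g :: gs) none none =
        pvEmit [] ((pvLastTag g "P:").or none) ((pvLastTag g "V:").or none) ++ gs.flatMap pvPkgOf := rfl
    rw [he, List.flatMap_cons]
    cases hP : pvLastTag g "P:" <;> cases hV : pvLastTag g "V:" <;>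
      simp [pvPkgOf, pvEmit, hP, hV]

lemma pvLastTag_nil (tag : String) : pvLastTag [] tag = none := by
  simp [pvLastTag]

lemma pvKey (ls : List String) :
    ∀ (p v : Option String), pvRunA ls p v = pvFromGroups (pvGroups ls) p v := by
  induction ls with
  | nil =>
    intro p v
    simp [pvRunA, pvGroups, pvFromGroups, pvLastTag_nil]
  | cons l ls ih =>
    intro p v
    have hP2 : ("P:" : String) = String.ofList ['P', ':'] := by decide
    have hV2 : ("V:" : String) = String.ofList ['V', ':'] := by decide
    simp only [pvRunA, pvGroups]
    by_cases hnil : l = ""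
    · simp only [if_pos hnil]
      rw [ih, pvFromGroups_none _ (pvGroups_ne_nil ls)]
      simp [pvFromGroups, pvLastTag_nil]
    · simp only [if_neg hnil]
      cases hg : pvGroups ls with
      | nil => exact absurd hg (pvGroups_ne_nil ls)
      | cons g gs =>
        by_cases hp : PySem.Str.slice l none (some 2) = "P:"
        · have hsw : PySem.Str.startswith l "P:" = true := by
            rw [hP2]; exact (pvStartswith_iff l 'P' ':').2 (hP2 ▸ hp)
          have hswV : PySem.Str.startswith l "V:" = false := by
            rw [hV2]
            apply Bool.eq_false_iff.2
            intro hc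
            have h2 := (pvStartswith_iff l 'V' ':').1 hc
            rw [← hV2] at h2
            rw [hp] at h2
            exact absurd h2 (by decide)
          simp only [if_pos hp]
          rw [ih, hg]
          simp only [pvFromGroups, pvLastTag_cons, hsw, hswV, if_true, Bool.false_eq_true,
            if_false, Option.or_none, Option.or_assoc, Option.some_or]
        · by_cases hv : PySem.Str.slice l none (some 2) = "V:"
          · have hsw : PySem.Str.startswith l "V:" = true := by
              rw [hV2]; exact (pvStartswith_iff l 'V' ':').2 (hV2 ▸ hv)
            have hswP : PySem.Str.startswith l "P:" = false := by
              rw [hP2]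
              apply Bool.eq_false_iff.2
              intro hc
              have h2 := (pvStartswith_iff l 'P' ':').1 hc
              rw [← hP2] at h2
              rw [hv] at h2
              exact absurd h2 (by decide)
            simp only [if_neg hp, if_pos hv]
            rw [ih, hg]
            simp only [pvFromGroups, pvLastTag_cons, hsw, hswP, if_true, Bool.false_eq_true,
              if_false, Option.or_none, Option.or_assoc, Option.some_or]
          · have hswP : PySem.Str.startswith l "P:" = false := by
              rw [hP2]
              apply Bool.eq_false_iff.2
              intro hc
              exact hp (hP2 ▸ (pvStartswith_iff l 'P' ':').1 hc)
            have hswV : PySem.Str.startswith l "V:" = false := by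
              rw [hV2]
              apply Bool.eq_false_iff.2
              intro hc
              exact hv (hV2 ▸ (pvStartswith_iff l 'V' ':').1 hc)
            simp only [if_neg hp, if_neg hv]
            rw [ih, hg]
            simp only [pvFromGroups, pvLastTag_cons, hswP, hswV, Bool.false_eq_true,
              if_false, Option.or_none]

-- ===== VERDICT (by name: the statement is the Claim_ definition above) =====
theorem apk_versions_py_spec : Claim_equal_apk_versions_py := by
  intro lines _
  unfold Spec_apk_versions_py apk_versions_py apk_versions_py_alt
  rw [pvFoldA lines [] none none, pvFoldG lines [] []]
  rw [pvKey lines none none, pvFromGroups_none _ (pvGroups_ne_nil lines)]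
  cases h : pvGroups lines with
  | nil => exact absurd h (pvGroups_ne_nil lines)
  | cons g gs => simp [pvConsHead]
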